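-- pv_equiv track=rewrite | github.com/WuGuommming/fragweave_project | fragweave/run_sweep_promptlocate.py | _normalize_for_search
-- ===== SOURCE A (Python) =====
-- from typing import Any, Dict, List, Optional, Sequence, Tuple
--
-- def _normalize_for_search(text: str) -> Tuple[str, List[int]]:
--     out_chars: List[str] = []
--     idx_map: List[int] = []
--     prev_space = False
--     for i, ch in enumerate(text):
--         if ch.isspace():
--             if prev_space:
--                 continue
--             out_chars.append(" ")
--             idx_map.append(i)
--             prev_space = True
--         else:
--             out_chars.append(ch.lower())
--             idx_map.append(i)
--             prev_space = False
--     norm = "".join(out_chars).strip()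
--     if not norm:
--         return "", []
--     left = 0
--     while left < len(out_chars) and out_chars[left] == " ":
--         left += 1
--     right = len(out_chars)
--     while right > left and out_chars[right - 1] == " ":
--         right -= 1
--     return norm, idx_map[left:right]
-- ===== SOURCE B (Python) =====
-- from typing import List, Tuple
--
-- def _normalize_for_search(text: str) -> Tuple[str, List[int]]:
--     # Run-based: scan maximal runs of same isspace() key; one ' ' per space run,
--     # then trim at most one space from each end (runs guarantee no doubled spaces).
--     out_chars: List[str] = []
--     idx_map: List[int] = []
--     n = len(text)
--     j = 0
--     while j < n:
--         key = text[j].isspace()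
--         k = j
--         while k < n and text[k].isspace() == key:
--             k += 1
--         if key:
--             out_chars.append(" ")
--             idx_map.append(j)
--         else:
--             for i in range(j, k):
--                 out_chars.append(text[i].lower())
--                 idx_map.append(i)
--         j = k
--     left = 1 if out_chars and out_chars[0] == " " else 0
--     right = len(out_chars) - (1 if len(out_chars) > left and out_chars[-1] == " " else 0)
--     return "".join(out_chars[left:right]), idx_map[left:right]
-- ===== Notes on version B (the rewrite author's own statement) =====
-- stated objective: alternative
-- what changed: Replaces the per-char loop with a prev_space flag plus strip() and two trimming while-loops by a run-based scan (one ' ' emitted per maximal whitespace run) followed by constant-time trimming of at most one space from each end.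
import Mathlib
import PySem

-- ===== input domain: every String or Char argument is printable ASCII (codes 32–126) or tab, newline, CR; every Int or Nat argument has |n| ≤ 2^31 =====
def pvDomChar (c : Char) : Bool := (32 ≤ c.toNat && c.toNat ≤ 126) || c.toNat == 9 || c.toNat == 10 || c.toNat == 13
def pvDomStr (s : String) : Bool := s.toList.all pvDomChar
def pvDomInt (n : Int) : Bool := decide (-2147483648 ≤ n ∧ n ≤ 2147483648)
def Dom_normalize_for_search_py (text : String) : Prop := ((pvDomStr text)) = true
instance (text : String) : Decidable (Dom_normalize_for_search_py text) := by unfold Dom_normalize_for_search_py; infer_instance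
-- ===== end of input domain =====

-- B replaces A's per-char loop with a prev_space flag by a run-based scan (one ' ' per
-- whitespace run) followed by constant-time trimming of at most one space per end;
-- objective: alternative decomposition, same asymptotic cost.

-- ===== PORT A =====
-- the `for i, ch in enumerate(text)` loop of A; the Python loop appends to out_chars /
-- idx_map, transcribed as structural recursion producing the same lists front-first.
def aLoopA : List (Int × Char) → Bool → List Char × List Int
  | [], _ => ([], [])
  | (i, c) :: rest, prev =>
    if PySem.Chars.isspace c then
      if prev then aLoopA rest true
      else
        let r := aLoopA rest true
        (' ' :: r.1, i :: r.2)
    else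
      let r := aLoopA rest false
      -- ch.lower() on a single char; PySem.Chars.lowerChar is exact per-char lower()
      (PySem.Chars.lowerChar c :: r.1, i :: r.2)

-- `left = 0; while left < len(out_chars) and out_chars[left] == " ": left += 1`
-- (the index loop counts the leading " " entries)
def aLeft : List Char → Nat
  | [] => 0
  | c :: r => if c = ' ' then aLeft r + 1 else 0

-- `right = len(out_chars); while right > left and out_chars[right - 1] == " ": right -= 1`
def aRight (o : List Char) (left : Nat) : Nat → Nat
  | 0 => 0
  | r + 1 => if left < r + 1 ∧ o[r]? = some ' ' then aRight o left r else r + 1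

def normalize_for_search_py (text : String) : String × List Int :=
  let st := aLoopA (PySem.List.enumerate text.toList 0) false
  let norm := PySem.Str.strip (String.ofList st.1)   -- "".join(out_chars).strip()
  if norm = "" then ("", [])
  else
    let left := aLeft st.1
    let right := aRight st.1 left st.1.length
    (norm, PySem.List.slice st.2 (some (left : Int)) (some (right : Int)))

-- ===== PORT B =====
-- B's outer while loop: each step consumes one maximal run of equal isspace() key
-- (the inner `while k < n and text[k].isspace() == key` = takeWhile/dropWhile).
def bRun : List (Int × Char) → List Char × List Int
  | [] => ([], [])
  | (j, c) :: rest =>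
    let key := PySem.Chars.isspace c
    let r := bRun (((j, c) :: rest).dropWhile (fun p => PySem.Chars.isspace p.2 == key))
    if key then (' ' :: r.1, j :: r.2)
    else
      let run := ((j, c) :: rest).takeWhile (fun p => PySem.Chars.isspace p.2 == key)
      (run.map (fun p => PySem.Chars.lowerChar p.2) ++ r.1, run.map (·.1) ++ r.2)
termination_by l => l.length
decreasing_by
  simp only [List.dropWhile_cons, beq_self_eq_true, if_pos, List.length_cons]
  exact Nat.lt_succ_of_le (List.length_dropWhile_le _ _)

def normalize_for_search_py_alt (text : String) : String × List Int :=
  let st := bRun (PySem.List.enumerate text.toList 0)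
  let left := if st.1.head? = some ' ' then 1 else 0
  let right := st.1.length - (if left < st.1.length ∧ st.1.getLast? = some ' ' then 1 else 0)
  (String.ofList ((st.1.drop left).take (right - left)), (st.2.drop left).take (right - left))

-- ===== PRECONDITION & SPEC =====
def Spec_normalize_for_search_py (text : String) (out : String × List Int) : Prop := out = normalize_for_search_py_alt text
instance (text : String) (out : String × List Int) : Decidable (Spec_normalize_for_search_py text out) := by unfold Spec_normalize_for_search_py; infer_instance

-- ===== CLAIM (what is proved, stated in full; the proofs are below) =====
def Claim_equal_normalize_for_search_py : Prop := ∀ (text : String), Dom_normalize_for_search_py text → Spec_normalize_for_search_py text (normalize_for_search_py text)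

-- ===== LEMMAS AND PROOFS =====

-- within the printable-ASCII domain, lower() never changes whether a char is whitespace
theorem isspace_lowerChar (c : Char) (hd : pvDomChar c = true) :
    PySem.Chars.isspace (PySem.Chars.lowerChar c) = PySem.Chars.isspace c := by
  have key : (List.range 128).all
      (fun n => PySem.Chars.isspace (PySem.Chars.lowerChar (Char.ofNat n)) ==
        PySem.Chars.isspace (Char.ofNat n)) = true := by decide
  have hlt : c.toNat < 128 := by
    simp [pvDomChar] at hd
    omega
  have := List.all_eq_true.mp key c.toNat (List.mem_range.mpr hlt)
  simpa [Char.ofNat_toNat] using this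

theorem aLoopA_true (l : List (Int × Char)) :
    aLoopA l true = aLoopA (l.dropWhile (fun p => PySem.Chars.isspace p.2)) false := by
  induction l with
  | nil => rfl
  | cons p r ih =>
    obtain ⟨i, c⟩ := p
    by_cases h : PySem.Chars.isspace c
    · simpa [aLoopA, List.dropWhile_cons, h] using ih
    · simp [aLoopA, List.dropWhile_cons, h]

theorem aLoopA_false_run (l : List (Int × Char)) :
    aLoopA l false =
      ((l.takeWhile (fun p => !PySem.Chars.isspace p.2)).map (fun p => PySem.Chars.lowerChar p.2)
          ++ (aLoopA (l.dropWhile (fun p => !PySem.Chars.isspace p.2)) false).1,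
       (l.takeWhile (fun p => !PySem.Chars.isspace p.2)).map (·.1)
          ++ (aLoopA (l.dropWhile (fun p => !PySem.Chars.isspace p.2)) false).2) := by
  induction l with
  | nil => rfl
  | cons p r ih =>
    obtain ⟨i, c⟩ := p
    by_cases h : PySem.Chars.isspace c
    · simp [List.takeWhile_cons, List.dropWhile_cons, h]
    · simp only [aLoopA, List.takeWhile_cons, List.dropWhile_cons, h, Bool.not_false,
        if_pos, if_neg, Bool.false_eq_true, not_false_iff, List.map_cons, List.cons_append]
      rw [ih]

theorem aLoopA_eq_bRun (l : List (Int × Char)) : aLoopA l false = bRun l := by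
  have main : ∀ n (l : List (Int × Char)), l.length ≤ n → aLoopA l false = bRun l := by
    intro n
    induction n with
    | zero =>
      intro l h
      have hl : l = [] := List.length_eq_zero_iff.mp (Nat.le_zero.mp h)
      subst hl; simp [aLoopA, bRun]
    | succ n ih =>
      intro l h
      match l with
      | [] => simp [aLoopA, bRun]
      | (i, c) :: r =>
        by_cases hc : PySem.Chars.isspace c
        · have h1 : aLoopA ((i, c) :: r) false =
              (' ' :: (aLoopA r true).1, i :: (aLoopA r true).2) := by
            simp [aLoopA, hc]
          rw [h1, aLoopA_true]
          have hlen : (r.dropWhile (fun p => PySem.Chars.isspace p.2)).length ≤ n := by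
            have := List.length_dropWhile_le (fun p : Int × Char => PySem.Chars.isspace p.2) r
            simp at h; omega
          rw [ih _ hlen]
          show _ = bRun ((i, c) :: r)
          conv_rhs => rw [bRun.eq_def]
          simp [hc]
        · rw [aLoopA_false_run]
          have hdrop : ((i, c) :: r).dropWhile (fun p => !PySem.Chars.isspace p.2)
              = r.dropWhile (fun p => !PySem.Chars.isspace p.2) := by
            simp [List.dropWhile_cons, hc]
          have hlen : (r.dropWhile (fun p => !PySem.Chars.isspace p.2)).length ≤ n := by
            have := List.length_dropWhile_le (fun p : Int × Char => !PySem.Chars.isspace p.2) r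
            simp at h; omega
          rw [hdrop, ih _ hlen]
          show _ = bRun ((i, c) :: r)
          have hb : PySem.Chars.isspace c = false := by simpa using hc
          conv_rhs => rw [bRun.eq_def]
          simp [hb, List.takeWhile_cons, List.dropWhile_cons]
  exact main l.length l le_rfl

-- invariants of A's loop output: whitespace entries are exactly ' ', no two adjacent ' ',
-- and (when prev_space = true) the output does not start with ' '; lists have equal length
theorem aLoopA_inv (l : List (Int × Char)) (b : Bool) (hd : ∀ p ∈ l, pvDomChar p.2 = true) :
    (∀ c ∈ (aLoopA l b).1, PySem.Chars.isspace c = true → c = ' ') ∧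
    List.IsChain (fun a b => ¬(a = ' ' ∧ b = ' ')) (aLoopA l b).1 ∧
    (b = true → ∀ x ∈ (aLoopA l b).1.head?, x ≠ ' ') := by
  induction l generalizing b with
  | nil => simp [aLoopA]
  | cons p r ih =>
    obtain ⟨i, c⟩ := p
    have hdc : pvDomChar c = true := hd (i, c) (by simp)
    have hdr : ∀ p ∈ r, pvDomChar p.2 = true := fun p hp => hd p (by simp [hp])
    by_cases hc : PySem.Chars.isspace c
    · cases b with
      | true => simpa [aLoopA, hc] using ih true hdr
      | false =>
        obtain ⟨g1, g2, g3⟩ := ih true hdr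
        have hh := g3 rfl
        refine ⟨?_, ?_, by simp⟩
        · intro x hx hs
          simp [aLoopA, hc] at hx
          rcases hx with hx | hx
          · exact hx
          · exact g1 x hx hs
        · have h1 : (aLoopA ((i, c) :: r) false).1 = ' ' :: (aLoopA r true).1 := by
            simp [aLoopA, hc]
          rw [h1, List.isChain_cons]
          exact ⟨fun y hy hcon => hh y hy hcon.2, g2⟩
    · have hls : PySem.Chars.isspace (PySem.Chars.lowerChar c) = false := by
        rw [isspace_lowerChar c hdc]; simpa using hc
      have hne : PySem.Chars.lowerChar c ≠ ' ' := by
        intro h; rw [h] at hls; simp [PySem.Chars.isspace] at hls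
      obtain ⟨g1, g2, _⟩ := ih false hdr
      have hb : PySem.Chars.isspace c = false := by simpa using hc
      refine ⟨?_, ?_, ?_⟩
      · intro x hx hs
        simp [aLoopA, hb] at hx
        rcases hx with hx | hx
        · rw [hx] at hs; rw [hls] at hs; exact absurd hs (by simp)
        · exact g1 x hx hs
      · have h1 : (aLoopA ((i, c) :: r) b).1 = PySem.Chars.lowerChar c :: (aLoopA r false).1 := by
          simp [aLoopA, hb]
        rw [h1, List.isChain_cons]
        exact ⟨fun y _ hcon => hne hcon.1, g2⟩
      · intro _ x hx
        simp [aLoopA, hb] at hx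
        subst hx; exact hne
  -- note: `aLoopA` with prev = b; branches follow A's `if ch.isspace()`

theorem aLoopA_len (l : List (Int × Char)) (b : Bool) :
    (aLoopA l b).2.length = (aLoopA l b).1.length := by
  induction l generalizing b with
  | nil => rfl
  | cons p r ih =>
    obtain ⟨i, c⟩ := p
    by_cases hc : PySem.Chars.isspace c
    · cases b with
      | true => simpa [aLoopA, hc] using ih true
      | false => simp [aLoopA, hc, ih true]
    · simp [aLoopA, hc, ih false]

-- on a "good" list (whitespace entries are exactly ' ', no doubled ' '),
-- stripping leading whitespace drops at most one leading ' '
theorem dropWhile_good (o : List Char)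
    (g1 : ∀ c ∈ o, PySem.Chars.isspace c = true → c = ' ')
    (g2 : List.IsChain (fun a b => ¬(a = ' ' ∧ b = ' ')) o) :
    o.dropWhile PySem.Chars.isspace = o.drop (if o.head? = some ' ' then 1 else 0) := by
  match o with
  | [] => simp
  | c :: t =>
    by_cases hc : c = ' '
    · subst hc
      have hsp : PySem.Chars.isspace ' ' = true := by decide
      simp only [List.dropWhile_cons, hsp, if_pos, List.head?_cons, Option.some.injEq, if_pos rfl,
        List.drop_succ_cons, List.drop_zero]
      match t with
      | [] => simp
      | c2 :: t2 =>
        have hne : c2 ≠ ' ' := by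
          rw [List.isChain_cons_cons] at g2
          exact fun h => g2.1 ⟨rfl, h⟩
        have h2 : PySem.Chars.isspace c2 = false := by
          by_contra h
          exact hne (g1 c2 (by simp) (by simpa using h))
        simp [List.dropWhile_cons, h2]
    · have h2 : PySem.Chars.isspace c = false := by
        by_contra h
        exact hc (g1 c (by simp) (by simpa using h))
      simp [List.dropWhile_cons, h2, hc]

theorem aLeft_good (o : List Char)
    (g1 : ∀ c ∈ o, PySem.Chars.isspace c = true → c = ' ')
    (g2 : List.IsChain (fun a b => ¬(a = ' ' ∧ b = ' ')) o) :
    aLeft o = if o.head? = some ' ' then 1 else 0 := by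
  match o with
  | [] => simp [aLeft]
  | c :: t =>
    by_cases hc : c = ' '
    · subst hc
      simp only [aLeft, if_pos rfl, List.head?_cons, Option.some.injEq]
      have ht : aLeft t = 0 := by
        match t with
        | [] => rfl
        | c2 :: t2 =>
          have hne : c2 ≠ ' ' := by
            rw [List.isChain_cons_cons] at g2
            exact fun h => g2.1 ⟨rfl, h⟩
          simp [aLeft, hne]
      simp [ht]
    · simp [aLeft, hc]

theorem aRight_good (o : List Char) (left : Nat)
    (g2 : List.IsChain (fun a b => ¬(a = ' ' ∧ b = ' ')) o) :
    aRight o left o.length =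
      o.length - (if left < o.length ∧ o.getLast? = some ' ' then 1 else 0) := by
  match ho : o.length with
  | 0 => simp [aRight]
  | k + 1 =>
    have hlast : o.getLast? = o[k]? := by
      rw [List.getLast?_eq_getElem?, ho]
      simp
    by_cases hsp : o[k]? = some ' '
    · by_cases hl : left < k + 1
      · have hrec : aRight o left (k + 1) = aRight o left k := by
          rw [aRight, if_pos ⟨hl, hsp⟩]
        have hk : aRight o left k = k := by
          match k with
          | 0 => rfl
          | k2 + 1 =>
            have hadj := List.isChain_iff_getElem.mp g2 k2 (by omega)
            have hc1 : o[k2 + 1] = ' ' := by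
              have hg : o[k2 + 1]? = some o[k2 + 1] := List.getElem?_eq_getElem (by omega)
              exact Option.some_inj.mp (hg.symm.trans hsp)
            have hne : o[k2] ≠ ' ' := fun h => hadj ⟨h, hc1⟩
            have hget : o[k2]? = some o[k2] := List.getElem?_eq_getElem (by omega)
            rw [aRight, if_neg]
            intro ⟨_, hcon⟩
            rw [hget] at hcon
            exact hne (by simpa using hcon)
        rw [hrec, hk, if_pos ⟨hl, hlast.trans hsp⟩]
        omega
      · rw [aRight, if_neg (fun h => hl h.1), if_neg (fun h => hl h.1)]
        omega
    · rw [aRight, if_neg (fun h => hsp h.2),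
        if_neg (fun h => hsp (hlast.symm.trans h.2))]
      omega

theorem rstrip_good (o : List Char)
    (g1 : ∀ c ∈ o, PySem.Chars.isspace c = true → c = ' ')
    (g2 : List.IsChain (fun a b => ¬(a = ' ' ∧ b = ' ')) o) :
    PySem.Chars.rstrip o = o.take (o.length - (if o.getLast? = some ' ' then 1 else 0)) := by
  have g1r : ∀ c ∈ o.reverse, PySem.Chars.isspace c = true → c = ' ' := by
    intro c hc; exact g1 c (List.mem_reverse.mp hc)
  have g2r : List.IsChain (fun a b => ¬(a = ' ' ∧ b = ' ')) o.reverse := by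
    rw [List.isChain_reverse]
    exact g2.imp (fun a b h hcon => h ⟨hcon.2, hcon.1⟩)
  have h1 := dropWhile_good o.reverse g1r g2r
  rw [List.head?_reverse] at h1
  unfold PySem.Chars.rstrip
  rw [h1, List.drop_reverse, List.reverse_reverse]

-- the characters of the enumerated input are in the printable-ASCII domain
theorem enum_dom (text : String) (hdom : Dom_normalize_for_search_py text) :
    ∀ p ∈ PySem.List.enumerate text.toList 0, pvDomChar p.2 = true := by
  intro p hp
  rw [PySem.List.mem_enumerate_iff] at hp
  obtain ⟨k, hk, rfl⟩ := hp
  exact List.all_eq_true.mp hdom _ (List.getElem_mem hk)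

-- A's post-processing (strip + two index while-loops + slice) equals B's
-- constant-time trim, on any "good" loop output
theorem post_eq (o : List Char) (m : List Int) (L rdec : Nat)
    (g1 : ∀ c ∈ o, PySem.Chars.isspace c = true → c = ' ')
    (g2 : List.IsChain (fun a b => ¬(a = ' ' ∧ b = ' ')) o)
    (hmo : m.length = o.length)
    (hL : L = if o.head? = some ' ' then 1 else 0)
    (hrd : rdec = if L < o.length ∧ o.getLast? = some ' ' then 1 else 0) :
    (if PySem.Str.strip (String.ofList o) = "" then ("", ([] : List Int))
     else (PySem.Str.strip (String.ofList o),
       PySem.List.slice m (some ((aLeft o : Nat) : Int))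
         (some ((aRight o (aLeft o) o.length : Nat) : Int))))
    = (String.ofList ((o.drop L).take (o.length - rdec - L)),
       (m.drop L).take (o.length - rdec - L)) := by
  have hL1 : L ≤ 1 := by rw [hL]; split <;> omega
  have hr1 : rdec ≤ 1 := by rw [hrd]; split <;> omega
  have f1 : aLeft o = L := by rw [aLeft_good o g1 g2, hL]
  have f2 : aRight o L o.length = o.length - rdec := by rw [aRight_good o L g2, hrd]
  have f3 : PySem.Chars.strip o = (o.drop L).take (o.length - rdec - L) := by
    unfold PySem.Chars.strip PySem.Chars.lstrip
    rw [dropWhile_good o g1 g2, ← hL]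
    rw [rstrip_good (o.drop L)
      (fun c hc => g1 c (List.mem_of_mem_drop hc)) (g2.drop L)]
    rw [List.getLast?_drop, List.length_drop]
    by_cases hlo : L < o.length
    · rw [if_neg (show ¬ o.length ≤ L by omega)]
      have heq : (if o.getLast? = some ' ' then 1 else 0) = rdec := by
        rw [hrd]
        by_cases hg : o.getLast? = some ' ' <;> simp [hg, hlo]
      rw [heq]
      congr 1
      omega
    · have hnil : o.drop L = [] := List.drop_eq_nil_iff.mpr (by omega)
      rw [hnil]; simp
  have f4 : PySem.Str.strip (String.ofList o) = String.ofList (PySem.Chars.strip o) := by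
    conv_lhs => rw [← String.ofList_toList (s := PySem.Str.strip (String.ofList o))]
    rw [PySem.Str.toList_strip, String.toList_ofList]
  rw [f4, f3, f1, f2]
  by_cases hempty : (o.drop L).take (o.length - rdec - L) = []
  · rw [hempty, if_pos rfl]
    have hm2 : (m.drop L).take (o.length - rdec - L) = [] := by
      rcases List.take_eq_nil_iff.mp hempty with h | h
      · rw [h]; simp
      · rw [List.drop_eq_nil_iff.mpr (by rw [hmo]; exact List.drop_eq_nil_iff.mp h)]
        simp
    rw [hm2]
  · rw [if_neg (by
      intro h
      apply hempty
      have := congrArg String.toList h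
      simpa [String.toList_ofList] using this)]
    rw [PySem.List.slice_natCast]

-- ===== VERDICT (by name: the statement is the Claim_ definition above) =====
theorem normalize_for_search_py_spec : Claim_equal_normalize_for_search_py := by
  intro text hdom
  unfold Spec_normalize_for_search_py
  have hd := enum_dom text hdom
  obtain ⟨g1, g2, -⟩ := aLoopA_inv (PySem.List.enumerate text.toList 0) false hd
  rw [normalize_for_search_py_alt,
    show bRun (PySem.List.enumerate text.toList 0)
        = aLoopA (PySem.List.enumerate text.toList 0) false from
      (aLoopA_eq_bRun _).symm,
    normalize_for_search_py]
  exact post_eq _ _ _ _ g1 g2 (aLoopA_len _ _) rfl rfl
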